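-- pv_equiv track=rewrite | github.com/miguelmendez1208/Propositional_Logic | main3.py | impTrue
-- ===== SOURCE A (Python) =====
-- def impTrue(clause):
--     def clean_literal(literal):
--         return literal[1:] if literal.startswith('~') else literal
--
--     literal_count = {}
--
--     for literal in clause:
--         cleaned_literal = clean_literal(literal)
--
--         if cleaned_literal not in literal_count:
--             literal_count[cleaned_literal] = 0
--         literal_count[cleaned_literal] += 1
--         if (literal_count[cleaned_literal] > 1):
--             return True
--     return False
-- ===== SOURCE B (Python) =====
-- def impTrue(clause):
--     cleaned = sorted(l[1:] if l.startswith('~') else l for l in clause)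
--     for a, b in zip(cleaned, cleaned[1:]):
--         if a == b:
--             return True
--     return False
-- ===== Notes on version B (the rewrite author's own statement) =====
-- stated objective: alternative
-- what changed: Replaces A's hash-count dict loop with a comparison-based algorithm: sort the cleaned literals, then a duplicate exists iff two adjacent entries of the sorted list are equal.
import Mathlib
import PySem

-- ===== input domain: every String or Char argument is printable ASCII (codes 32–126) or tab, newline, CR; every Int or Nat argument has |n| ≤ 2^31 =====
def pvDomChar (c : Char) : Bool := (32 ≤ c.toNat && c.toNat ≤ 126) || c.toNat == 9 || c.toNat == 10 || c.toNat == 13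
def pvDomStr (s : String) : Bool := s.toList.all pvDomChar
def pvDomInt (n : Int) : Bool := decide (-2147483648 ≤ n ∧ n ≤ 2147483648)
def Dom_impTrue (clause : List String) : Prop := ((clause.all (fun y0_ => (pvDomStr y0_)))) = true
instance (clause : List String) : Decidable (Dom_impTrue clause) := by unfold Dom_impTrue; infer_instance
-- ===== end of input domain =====

-- B replaces A's hash-count dict loop by a comparison-based algorithm: sort the cleaned
-- literals, then scan for an equal ADJACENT pair (objective: alternative; not faster).

-- ===== PORT A =====
def impTrue_cleanLiteral (literal : String) : String :=
  if PySem.Str.startswith literal "~" then PySem.Str.slice literal (some 1) none else literal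

def impTrue_loop (litCount : PySem.Dict String Int) : List String → Bool
  | [] => false
  | literal :: rest =>
    let c := impTrue_cleanLiteral literal
    let d1 := if litCount.contains c then litCount else litCount.insert c 0
    let d2 := d1.insert c (d1.getD c 0 + 1)
    if d2.getD c 0 > 1 then true else impTrue_loop d2 rest

def impTrue (clause : List String) : Bool :=
  impTrue_loop PySem.Dict.empty clause

-- ===== PORT B =====
-- the zip(cleaned, cleaned[1:]) scan: true iff some adjacent pair is equal
def impTrue_adjDup : List String → Bool
  | a :: b :: t => a == b || impTrue_adjDup (b :: t)
  | _ => false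

def impTrue_alt (clause : List String) : Bool :=
  let cleaned := PySem.List.sorted
    (clause.map (fun l =>
      if PySem.Str.startswith l "~" then PySem.Str.slice l (some 1) none else l))
    (fun x => x) false
  impTrue_adjDup cleaned

-- ===== PRECONDITION & SPEC =====
def Spec_impTrue (clause : List String) (out : Bool) : Prop := out = impTrue_alt clause
instance (clause : List String) (out : Bool) : Decidable (Spec_impTrue clause out) := by unfold Spec_impTrue; infer_instance

-- ===== CLAIM (what is proved, stated in full; the proofs are below) =====
def Claim_equal_impTrue : Prop := ∀ (clause : List String), Dom_impTrue clause → Spec_impTrue clause (impTrue clause)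

-- ===== LEMMAS AND PROOFS =====

-- on a ≤-sorted list, the adjacent-equality scan returns false exactly when the list is strictly increasing
theorem pv_adjDup_of_pairwise_le (l : List String) (hp : l.Pairwise (· ≤ ·)) :
    (impTrue_adjDup l = false ↔ l.Pairwise (· < ·)) := by
  induction l with
  | nil => simp [impTrue_adjDup]
  | cons a t ih =>
    cases t with
    | nil => simp [impTrue_adjDup]
    | cons b t' =>
      have hab : a ≤ b := (List.pairwise_cons.1 hp).1 b (List.mem_cons_self ..)
      have htail := ih (List.pairwise_cons.1 hp).2
      constructor
      · intro h
        simp only [impTrue_adjDup, Bool.or_eq_false_iff, beq_eq_false_iff_ne] at h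
        have hrest := htail.1 h.2
        have hab' : a < b := lt_of_le_of_ne hab h.1
        refine List.pairwise_cons.2 ⟨fun y hy => ?_, hrest⟩
        rcases List.mem_cons.1 hy with rfl | hy
        · exact hab'
        · exact lt_of_lt_of_le hab' (le_of_lt ((List.pairwise_cons.1 hrest).1 y hy))
      · intro h
        obtain ⟨hall, hrest⟩ := List.pairwise_cons.1 h
        have hf : impTrue_adjDup (b :: t') = false := htail.2 hrest
        simp [impTrue_adjDup, hf, ne_of_lt (hall b (List.mem_cons_self ..))]

-- Nodup ↔ strictly increasing, for a ≤-sorted list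
theorem pv_nodup_iff_pairwise_lt (l : List String) (hp : l.Pairwise (· ≤ ·)) :
    l.Nodup ↔ l.Pairwise (· < ·) := by
  constructor
  · intro hnd
    exact (hp.and hnd).imp (fun h => lt_of_le_of_ne h.1 h.2)
  · intro hlt
    exact hlt.imp ne_of_lt

-- B computes "the cleaned list has a duplicate"
theorem pv_alt_char (clause : List String) :
    impTrue_alt clause = decide ¬(clause.map impTrue_cleanLiteral).Nodup := by
  unfold impTrue_alt
  have hfun : (fun l => if PySem.Str.startswith l "~" then PySem.Str.slice l (some 1) none else l)
      = impTrue_cleanLiteral := rfl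
  rw [hfun]
  set m := clause.map impTrue_cleanLiteral with hm
  set s := PySem.List.sorted m (fun x => x) false with hs
  have hp : s.Pairwise (· ≤ ·) := by
    have := PySem.List.sorted_pairwise (xs := m) (key := fun x => x)
    simpa using this
  have hperm : s.Perm m := PySem.List.sorted_perm ..
  have hnd : s.Nodup ↔ m.Nodup := hperm.nodup_iff
  by_cases h : m.Nodup
  · have : impTrue_adjDup s = false :=
      (pv_adjDup_of_pairwise_le s hp).2 ((pv_nodup_iff_pairwise_lt s hp).1 (hnd.2 h))
    simp [this, h]
  · have hne : impTrue_adjDup s ≠ false := fun hf =>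
      h (hnd.1 ((pv_nodup_iff_pairwise_lt s hp).2 ((pv_adjDup_of_pairwise_le s hp).1 hf)))
    cases hv : impTrue_adjDup s with
    | false => exact absurd hv hne
    | true => simp [h]

-- A's loop, characterised: it returns true iff some cleaned literal is already a key
-- of the count dict, or the cleaned tail itself has a duplicate.
theorem pv_loop_char (ls : List String) :
    ∀ d : PySem.Dict String Int, (∀ k, d.contains k = true → 1 ≤ d.getD k 0) →
      impTrue_loop d ls =
        ((ls.map impTrue_cleanLiteral).any (fun c => d.contains c) ||
          decide (¬ (ls.map impTrue_cleanLiteral).Nodup)) := by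
  induction ls with
  | nil => intro d _; simp [impTrue_loop]
  | cons l ls ih =>
    intro d hinv
    simp only [impTrue_loop, List.map_cons, List.any_cons, List.nodup_cons]
    by_cases hc : d.contains (impTrue_cleanLiteral l) = true
    · have h1 : 1 ≤ d.getD (impTrue_cleanLiteral l) 0 := hinv _ hc
      rw [if_pos hc, if_pos]
      · simp [hc]
      · simp only [PySem.Dict.getD_insert_self]
        omega
    · have hc' : d.contains (impTrue_cleanLiteral l) = false := by
        cases h : d.contains (impTrue_cleanLiteral l) with
        | false => rfl
        | true => exact absurd h hc
      simp only [hc', Bool.false_eq_true, if_false]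
      set c := impTrue_cleanLiteral l with hcdef
      have hg0 : (d.insert c 0).getD c 0 = 0 := PySem.Dict.getD_insert_self ..
      rw [hg0, PySem.Dict.getD_insert_self, if_neg (by norm_num)]
      set d2 := (d.insert c 0).insert c (0 + 1) with hd2
      have hcont2 : ∀ k, d2.contains k = (k == c || d.contains k) := by
        intro k
        rw [hd2]
        simp only [PySem.Dict.contains_insert]
        cases h : (k == c) <;> simp
      have hgd2 : ∀ k, k ≠ c → d2.getD k 0 = d.getD k 0 := by
        intro k hkc
        simp [hd2, PySem.Dict.getD_insert, hkc]
      have hinv2 : ∀ k, d2.contains k = true → 1 ≤ d2.getD k 0 := by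
        intro k hk
        by_cases hkc : k = c
        · subst hkc
          rw [hd2, PySem.Dict.getD_insert_self]
          norm_num
        · rw [hgd2 k hkc]
          apply hinv
          rw [hcont2] at hk
          rcases Bool.or_eq_true_iff.1 hk with h | h
          · exact absurd (by simpa using h) hkc
          · exact h
      rw [ih d2 hinv2]
      have hany : ((ls.map impTrue_cleanLiteral).any (fun x => d2.contains x)) =
          (decide (c ∈ ls.map impTrue_cleanLiteral) ||
            (ls.map impTrue_cleanLiteral).any (fun x => d.contains x)) := by
        by_cases hmem : c ∈ ls.map impTrue_cleanLiteral
        · have h1 : ((ls.map impTrue_cleanLiteral).any fun x => d2.contains x) = true := by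
            simp only [List.any_eq_true]
            exact ⟨c, hmem, by simp [hcont2]⟩
          simp [h1, hmem]
        · rw [Bool.eq_iff_iff]
          simp only [hmem, decide_false, Bool.false_or, List.any_eq_true, hcont2,
            Bool.or_eq_true, beq_iff_eq]
          constructor
          · rintro ⟨x, hx, rfl | hdx⟩
            · exact absurd hx hmem
            · exact ⟨x, hx, hdx⟩
          · rintro ⟨x, hx, hdx⟩
            exact ⟨x, hx, Or.inr hdx⟩
      rw [hany]
      simp only [Bool.false_or]
      by_cases hmem : c ∈ ls.map impTrue_cleanLiteral <;>
        by_cases hnd : (ls.map impTrue_cleanLiteral).Nodup <;>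
        simp [hmem, hnd]

-- ===== VERDICT (by name: the statement is the Claim_ definition above) =====
theorem impTrue_spec : Claim_equal_impTrue := by
  intro clause _
  unfold Spec_impTrue impTrue
  rw [pv_loop_char clause PySem.Dict.empty (by intro k hk; simp at hk), pv_alt_char]
  simp [PySem.Dict.contains_empty]
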